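-- pv_equiv track=rewrite | github.com/GiulianoCornacchia/Urban-Impact-Navigators | src/utils_mobility_demand.py | generate_intervals
-- ===== SOURCE A (Python) =====
-- def generate_intervals(N, S):
--
--     # each interval is [a, b)
--
--     interval_size = N // S
--     intervals = []
--     for i in range(S):
--         start = i * interval_size
--         end = (i + 1) * interval_size - 1 if i < S - 1 else N - 1
--         intervals.append((start, end+1))
--     return intervals
-- ===== SOURCE B (Python) =====
-- def generate_intervals(N, S):
--     # each interval is [a, b)
--     # Build back-to-front: walk i from S-1 down to 0 carrying the current
--     # right boundary (initially N), so each interval's end is the previous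
--     # start and no last-interval branch is needed; reverse at the end.
--     interval_size = N // S
--     acc = []
--     end = N
--     i = S - 1
--     while i >= 0:
--         start = i * interval_size
--         acc.append((start, end))
--         end = start
--         i -= 1
--     acc.reverse()
--     return acc
-- ===== Notes on version B (the rewrite author's own statement) =====
-- stated objective: alternative
-- what changed: B builds the intervals back-to-front, threading the current right boundary through the loop (each interval's end is the previous interval's start, starting from N), then reverses, eliminating A's forward loop with its special-cased last-interval end.
import Mathlib
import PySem

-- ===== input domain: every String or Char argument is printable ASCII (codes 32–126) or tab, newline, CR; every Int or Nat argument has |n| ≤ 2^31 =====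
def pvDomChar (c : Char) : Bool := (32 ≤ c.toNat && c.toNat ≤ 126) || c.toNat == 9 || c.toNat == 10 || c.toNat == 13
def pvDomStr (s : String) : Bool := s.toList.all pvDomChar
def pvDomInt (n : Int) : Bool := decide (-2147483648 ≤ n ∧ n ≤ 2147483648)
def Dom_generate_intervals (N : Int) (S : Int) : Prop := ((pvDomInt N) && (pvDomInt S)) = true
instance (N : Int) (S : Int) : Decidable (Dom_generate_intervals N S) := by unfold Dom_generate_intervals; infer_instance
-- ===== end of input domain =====

-- B builds the intervals back-to-front, threading the current right boundary, then reverses (objective: alternative).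

-- ===== PORT A =====
def generate_intervals (N : Int) (S : Int) : List (Int × Int) :=
  let interval_size := PySem.Int.floordiv N S
  (PySem.List.pyRange 0 S 1).foldl
    (fun intervals i =>
      let start := i * interval_size
      let e := if i < S - 1 then (i + 1) * interval_size - 1 else N - 1
      intervals ++ [(start, e + 1)]) []

-- ===== PORT B =====
-- while loop of Source B: fuel n stands for i + 1 (the loop runs while i ≥ 0, i.e. n > 0);
-- state is (end, acc); appends then a final reverse, exactly as Source B.
def pvGoB (size : Int) : Nat → Int → List (Int × Int) → List (Int × Int)
  | 0, _, acc => acc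
  | n + 1, e, acc =>
      let start := (n : Int) * size
      pvGoB size n start (acc ++ [(start, e)])

def generate_intervals_alt (N : Int) (S : Int) : List (Int × Int) :=
  let interval_size := PySem.Int.floordiv N S
  (pvGoB interval_size S.toNat N []).reverse

-- ===== PRECONDITION & SPEC =====
-- A raises ZeroDivisionError when S = 0 (so does B); excluded here.
def Pre_generate_intervals (N : Int) (S : Int) : Prop := S ≠ 0
instance (N : Int) (S : Int) : Decidable (Pre_generate_intervals N S) := by unfold Pre_generate_intervals; infer_instance
def pvWitness_generate_intervals : Int × Int := (10, 3)

def Spec_generate_intervals (N : Int) (S : Int) (out : List (Int × Int)) : Prop := out = generate_intervals_alt N S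
instance (N : Int) (S : Int) (out : List (Int × Int)) : Decidable (Spec_generate_intervals N S out) := by unfold Spec_generate_intervals; infer_instance

-- ===== CLAIM =====
def Claim_equal_generate_intervals : Prop := ∀ (N : Int) (S : Int), Dom_generate_intervals N S → Pre_generate_intervals N S → Spec_generate_intervals N S (generate_intervals N S)

-- ===== LEMMAS AND PROOFS =====

-- the chain of intervals produced right-to-left, as a pure list
def pvChain (size : Int) : Nat → Int → List (Int × Int)
  | 0, _ => []
  | n + 1, e => ((n : Int) * size, e) :: pvChain size n ((n : Int) * size)

lemma pvGoB_eq_chain (size : Int) : ∀ (n : Nat) (e : Int) (acc : List (Int × Int)),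
    pvGoB size n e acc = acc ++ pvChain size n e := by
  intro n
  induction n with
  | zero => intro e acc; simp [pvGoB, pvChain]
  | succ k ih => intro e acc; simp [pvGoB, pvChain, ih]

lemma pvChain_reverse (size : Int) : ∀ (n : Nat),
    (pvChain size n ((n : Int) * size)).reverse
      = (List.range n).map (fun k => ((k : Int) * size, ((k : Int) + 1) * size)) := by
  intro n
  induction n with
  | zero => simp [pvChain]
  | succ m ih =>
    have : ((m : Int) + 1) * size = (((m + 1 : Nat) : Int)) * size := by push_cast; ring
    simp [pvChain, List.range_succ, ih]

-- ===== VERDICT =====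
theorem generate_intervals_spec : Claim_equal_generate_intervals := by
  intro N S _ _
  unfold Spec_generate_intervals generate_intervals generate_intervals_alt
  simp only []
  rw [PySem.List.foldl_append_singleton_eq_map]
  rw [PySem.List.pyRange_one]
  cases hn : S.toNat with
  | zero =>
    have h0 : (S - 0).toNat = 0 := by omega
    rw [h0]; simp [pvGoB]
  | succ m =>
    have hS : S = (m : Int) + 1 := by omega
    have h0 : (S - 0).toNat = m + 1 := by omega
    rw [h0, List.map_map]
    rw [pvGoB_eq_chain]
    simp only [pvChain, List.nil_append, List.reverse_cons, pvChain_reverse]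
    rw [List.range_succ, List.map_append]
    congr 1
    · simp only [List.pure_def, List.bind_eq_flatMap]
      rw [← List.map_eq_flatMap, List.map_map]
      apply List.map_congr_left
      intro k hk
      have hkm := List.mem_range.mp hk
      have hk' : (k : Int) < S - 1 := by omega
      simp [Function.comp, hk']
    · have hm : ¬ ((m : Int) < S - 1) := by omega
      simp [hm]
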